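-- pv_equiv track=rewrite | github.com/OuuGiii/AdventOfCode | Y2019/Dec06/orbits2 2.py | find_parents_for_child
-- ===== SOURCE A (Python) =====
-- CENTER_OF_MASS = "COM"
--
-- def find_parents_for_child(child, dictionary_of_children,
--                            dictionary_of_parents):
--     parent = dictionary_of_children[child]
--     dictionary_of_parents[parent] = 0
--
--     if dictionary_of_children[child] == CENTER_OF_MASS:
--         return dictionary_of_parents
--
--     child = parent
--
--     return find_parents_for_child(child, dictionary_of_children,
--                                   dictionary_of_parents)
-- ===== SOURCE B (Python) =====
-- CENTER_OF_MASS = "COM"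
--
-- def find_parents_for_child(child, dictionary_of_children,
--                            dictionary_of_parents):
--     # Iterative: first walk the chain collecting ancestors, then record them.
--     chain = []
--     current = child
--     while True:
--         current = dictionary_of_children[current]
--         chain.append(current)
--         if current == CENTER_OF_MASS:
--             break
--     for p in chain:
--         dictionary_of_parents[p] = 0
--     return dictionary_of_parents
-- ===== Notes on version B (the rewrite author's own statement) =====
-- stated objective: idiomatic
-- what changed: Replaces the tail recursion that mutates the dict at each step with an iterative while-loop that first collects the ancestor chain into a list and then records all entries in one pass; same return value, same final in-place mutation, same KeyError behaviour on missing keys.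
import Mathlib
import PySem

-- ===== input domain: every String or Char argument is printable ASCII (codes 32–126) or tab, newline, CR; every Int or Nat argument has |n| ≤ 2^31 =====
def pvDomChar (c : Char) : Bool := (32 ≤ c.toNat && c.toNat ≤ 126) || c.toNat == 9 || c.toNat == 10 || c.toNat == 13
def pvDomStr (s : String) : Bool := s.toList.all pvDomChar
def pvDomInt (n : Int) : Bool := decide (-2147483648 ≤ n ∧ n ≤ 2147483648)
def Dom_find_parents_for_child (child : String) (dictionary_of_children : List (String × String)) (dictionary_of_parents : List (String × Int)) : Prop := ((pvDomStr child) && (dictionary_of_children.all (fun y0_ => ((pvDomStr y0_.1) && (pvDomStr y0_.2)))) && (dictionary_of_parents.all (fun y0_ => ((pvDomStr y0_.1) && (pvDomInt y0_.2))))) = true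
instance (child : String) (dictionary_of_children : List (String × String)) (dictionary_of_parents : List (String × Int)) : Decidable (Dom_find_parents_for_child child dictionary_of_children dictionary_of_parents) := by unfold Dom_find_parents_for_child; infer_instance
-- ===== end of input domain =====

-- B replaces A's tail recursion (mutate dict, recurse) with an iterative loop that collects
-- the ancestor chain into a list first and then records the entries; equivalence is about the
-- RETURN value (both programs also perform the same in-place mutation on success).

-- ===== PORT A =====
-- A's recursion: look up parent, set dictionary_of_parents[parent] = 0, stop if the parent is
-- "COM", else recurse on the parent.  Fuel only makes the recursion total: Pre_ guarantees the
-- chain reaches "COM" within dictionary_of_children.length steps, so fuel never runs out there.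
-- (A reads dictionary_of_children[child] twice; the dict is unmutated, so one lookup is exact.)
def findARec (dc : PySem.Dict String String) : Nat → String → PySem.Dict String Int → PySem.Dict String Int
  | 0, _, dp => dp
  | fuel + 1, child, dp =>
    match dc.get? child with
    | none => dp          -- KeyError in Python: excluded by Pre_
    | some parent =>
      let dp := dp.insert parent 0
      if parent == "COM" then dp
      else findARec dc fuel parent dp

def find_parents_for_child (child : String) (dictionary_of_children : List (String × String)) (dictionary_of_parents : List (String × Int)) : List (String × Int) :=
  (findARec (PySem.Dict.ofList dictionary_of_children) (dictionary_of_children.length + 1)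
      child (PySem.Dict.ofList dictionary_of_parents)).items

-- ===== PORT B =====
-- B's while-loop collecting the chain (list.append → acc ++ [p]); none = KeyError, excluded by Pre_.
def chainAux (dc : PySem.Dict String String) : Nat → String → List String → Option (List String)
  | 0, _, _ => none
  | fuel + 1, current, acc =>
    match dc.get? current with
    | none => none
    | some p =>
      if p == "COM" then some (acc ++ [p])
      else chainAux dc fuel p (acc ++ [p])

def find_parents_for_child_alt (child : String) (dictionary_of_children : List (String × String)) (dictionary_of_parents : List (String × Int)) : List (String × Int) :=
  match chainAux (PySem.Dict.ofList dictionary_of_children) (dictionary_of_children.length + 1) child [] with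
  | some chain => (chain.foldl (fun d p => d.insert p 0) (PySem.Dict.ofList dictionary_of_parents)).items
  | none => (PySem.Dict.ofList dictionary_of_parents).items   -- KeyError in Python: excluded by Pre_

-- ===== PRECONDITION & SPEC =====
-- k-th iterated parent lookup (a graph-shape condition used by Pre_, not either port's code)
def nthParent (dc : PySem.Dict String String) : Nat → String → Option String
  | 0, s => some s
  | k + 1, s => (dc.get? s).bind (nthParent dc k)

-- Pre_: the parent chain starting at child reaches "COM" (within the number of edges); on all
-- other inputs Python A either raises KeyError or recurses forever.
def Pre_find_parents_for_child (child : String) (dictionary_of_children : List (String × String)) (dictionary_of_parents : List (String × Int)) : Prop :=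
  ∃ k < dictionary_of_children.length + 1,
    nthParent (PySem.Dict.ofList dictionary_of_children) (k + 1) child = some "COM"
instance (child : String) (dictionary_of_children : List (String × String)) (dictionary_of_parents : List (String × Int)) : Decidable (Pre_find_parents_for_child child dictionary_of_children dictionary_of_parents) := by unfold Pre_find_parents_for_child; infer_instance

def pvWitness_find_parents_for_child : String × (List (String × String)) × (List (String × Int)) :=
  ("A", [("A", "B"), ("B", "COM")], [("x", 5)])

def Spec_find_parents_for_child (child : String) (dictionary_of_children : List (String × String)) (dictionary_of_parents : List (String × Int)) (out : List (String × Int)) : Prop := out = find_parents_for_child_alt child dictionary_of_children dictionary_of_parents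
instance (child : String) (dictionary_of_children : List (String × String)) (dictionary_of_parents : List (String × Int)) (out : List (String × Int)) : Decidable (Spec_find_parents_for_child child dictionary_of_children dictionary_of_parents out) := by unfold Spec_find_parents_for_child; infer_instance

-- ===== CLAIM (what is proved, stated in full; the proofs are below) =====
def Claim_equal_find_parents_for_child : Prop := ∀ (child : String) (dictionary_of_children : List (String × String)) (dictionary_of_parents : List (String × Int)), Dom_find_parents_for_child child dictionary_of_children dictionary_of_parents → Pre_find_parents_for_child child dictionary_of_children dictionary_of_parents → Spec_find_parents_for_child child dictionary_of_children dictionary_of_parents (find_parents_for_child child dictionary_of_children dictionary_of_parents)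

-- ===== LEMMAS AND PROOFS =====

theorem pvWitness_ok :
    Dom_find_parents_for_child pvWitness_find_parents_for_child.1 pvWitness_find_parents_for_child.2.1 pvWitness_find_parents_for_child.2.2 ∧
    Pre_find_parents_for_child pvWitness_find_parents_for_child.1 pvWitness_find_parents_for_child.2.1 pvWitness_find_parents_for_child.2.2 := by
  constructor
  · decide
  · exact ⟨1, by decide, by decide⟩

-- Core invariant: if the chain from `child` reaches "COM" within `fuel` steps, B's collector
-- succeeds with some chain `ch` (appended after any accumulator), and A's recursion from any
-- dict equals folding insert over exactly `ch`.
theorem core (dc : PySem.Dict String String) :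
    ∀ (fuel : Nat) (child : String),
      (∃ k < fuel, nthParent dc (k + 1) child = some "COM") →
      ∀ (acc : List String),
        ∃ ch, chainAux dc fuel child acc = some (acc ++ ch) ∧
          ∀ (dp : PySem.Dict String Int),
            findARec dc fuel child dp = ch.foldl (fun d p => d.insert p 0) dp := by
  intro fuel
  induction fuel with
  | zero => intro child h; obtain ⟨k, hk, _⟩ := h; omega
  | succ f ih =>
    intro child h acc
    obtain ⟨k, hk, hreach⟩ := h
    simp only [nthParent] at hreach
    cases hget : dc.get? child with
    | none => rw [hget] at hreach; simp at hreach
    | some p =>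
      rw [hget] at hreach
      simp only [Option.bind_some] at hreach
      by_cases hp : p = "COM"
      · subst hp
        refine ⟨["COM"], ?_, ?_⟩
        · simp [chainAux, hget]
        · intro dp; simp [findARec, hget, List.foldl]
      · -- p ≠ "COM": from hreach, k must be a successor
        cases k with
        | zero =>
          simp only [nthParent] at hreach
          exact absurd (Option.some.inj hreach) hp
        | succ k' =>
          have hreach' : nthParent dc (k' + 1) p = some "COM" := hreach
          obtain ⟨ch', hch', hfold⟩ := ih p ⟨k', by omega, hreach'⟩ (acc ++ [p])
          refine ⟨p :: ch', ?_, ?_⟩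
          · simp only [chainAux, hget]
            rw [if_neg (by simp [hp])]
            rw [hch']; simp
          · intro dp
            simp only [findARec, hget]
            rw [if_neg (by simp [hp])]
            exact hfold (dp.insert p 0)

-- ===== VERDICT (by name: the statement is the Claim_ definition above) =====
theorem find_parents_for_child_spec : Claim_equal_find_parents_for_child := by
  intro child dc dp _hdom hpre
  obtain ⟨k, hk, hreach⟩ := hpre
  unfold Spec_find_parents_for_child find_parents_for_child find_parents_for_child_alt
  obtain ⟨ch, hch, hfold⟩ := core (PySem.Dict.ofList dc) (dc.length + 1) child
    ⟨k, by omega, hreach⟩ []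
  rw [hch, hfold]; simp
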